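-- pv_equiv track=rewrite | github.com/gamer-project/gamer_regression | regression_test/script/run_gamer.py | compare_para
-- ===== SOURCE A (Python) =====
-- import copy
--
-- def compare_para( para_1, para_2 ):
--     para_1_copy = copy.deepcopy( para_1 )
--     para_2_copy = copy.deepcopy( para_2 )
--
--     diff_para = {"1":{}, "2":{}}
--     for sec in para_1:
--         # 1. store all the sections exist only in para_1
--         if sec not in para_2:
--             for para in para_1[sec]:
--                 diff_para["1"][para] = para_1[sec][para]
--                 diff_para["2"][para] = "EMPTY"
--             continue
--         # 2. store all the parameters exist only in para_1
--         for para in para_1[sec]: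
--             if para not in para_2[sec]:
--                 diff_para["1"][para] = para_1[sec][para]
--                 diff_para["2"][para] = "EMPTY"
--                 para_1_copy[sec].pop(para)
--                 continue
--
--             # 3. store the different parameter
--             if para_1[sec][para] != para_2[sec][para]:
--                 diff_para["1"][para] = para_1[sec][para]
--                 diff_para["2"][para] = para_2[sec][para]
--
--             # 4. remove the compared parameter
--             para_1_copy[sec].pop(para)
--             para_2_copy[sec].pop(para)
--
--         # 5. store all the parameters exist only in para_2
--         for para in para_2_copy[sec]:
--             diff_para["1"][para] = "EMPTY"
--             diff_para["2"][para] = para_2[sec][para]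
--
--         # 6. clean empty dict
--         para_1_copy.pop(sec)
--         para_2_copy.pop(sec)
--
--     # 7. store all the sections exist only in para_2
--     for sec in para_2:
--         if sec in para_1: continue
--         for para in para_2_copy[sec]:
--             diff_para["1"][para] = "EMPTY"
--             diff_para["2"][para] = para_2[sec][para]
--         para_2_copy.pop(sec)
--
--     return diff_para
-- ===== SOURCE B (Python) =====
-- def compare_para(para_1, para_2):
--     # one uniform classification pass: walk the ordered union of sections and,
--     # inside each, the ordered union of parameter names; collect (name, v1, v2)
--     # triples, then build the two result dicts from the triple list.
--     triples = []
--     secs = list(para_1) + [s for s in para_2 if s not in para_1]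
--     for sec in secs:
--         ps1 = para_1.get(sec, {})
--         ps2 = para_2.get(sec, {})
--         keys = list(ps1) + [k for k in ps2 if k not in ps1]
--         for k in keys:
--             if k not in ps2:
--                 triples.append((k, ps1[k], "EMPTY"))
--             elif k not in ps1:
--                 triples.append((k, "EMPTY", ps2[k]))
--             elif ps1[k] != ps2[k]:
--                 triples.append((k, ps1[k], ps2[k]))
--     return {"1": {k: v1 for k, v1, _ in triples},
--             "2": {k: v2 for k, _, v2 in triples}}
-- ===== Notes on version B (the rewrite author's own statement) =====
-- stated objective: simpler
-- what changed: A deep-copies both inputs and mutates them with per-key pops to track unmatched parameters; B drops the copies entirely and does one uniform classification pass over the ordered union of sections and parameter names, collecting (name, v1, v2) triples and building the two result dicts from the triple list at the end.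
import Mathlib
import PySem

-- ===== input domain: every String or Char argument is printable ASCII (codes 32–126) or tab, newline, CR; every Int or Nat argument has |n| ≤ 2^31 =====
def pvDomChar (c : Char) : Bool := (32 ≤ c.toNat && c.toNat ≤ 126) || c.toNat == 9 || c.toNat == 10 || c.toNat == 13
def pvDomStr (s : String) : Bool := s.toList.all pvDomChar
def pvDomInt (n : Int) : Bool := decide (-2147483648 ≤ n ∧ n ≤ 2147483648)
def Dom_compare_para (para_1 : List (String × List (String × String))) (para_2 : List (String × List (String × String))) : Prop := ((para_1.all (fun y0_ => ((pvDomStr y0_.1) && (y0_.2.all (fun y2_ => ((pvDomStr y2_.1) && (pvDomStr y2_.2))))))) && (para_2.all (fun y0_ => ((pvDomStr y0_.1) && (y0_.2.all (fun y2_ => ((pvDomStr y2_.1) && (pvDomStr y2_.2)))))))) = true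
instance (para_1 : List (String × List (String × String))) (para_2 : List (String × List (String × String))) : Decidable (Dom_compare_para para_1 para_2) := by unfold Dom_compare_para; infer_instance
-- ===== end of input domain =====

-- B replaces A's deepcopy/pop bookkeeping by one uniform classification pass over the
-- ordered union of sections and parameter names, collecting (name, v1, v2) triples and
-- building the two result dicts from the triple list at the end (objective: simpler).

-- the Python parameters are dicts of dicts; both ports receive them as association
-- lists and first build the corresponding PySem.Dict (dict(pairs) semantics); shared
-- input-conversion helper for both ports
def pvDictOf (l : List (String × List (String × String))) :
    PySem.Dict String (PySem.Dict String String) :=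
  PySem.Dict.ofList (l.map (fun s => (s.1, PySem.Dict.ofList s.2)))

-- ===== PORT A =====
-- loop body of A's inner 'for para in para_1[sec]' (steps 2–4); state =
-- (para_1_copy, para_2_copy, diff_para["1"], diff_para["2"]); a dict pop of key
-- 'para' inside copy[sec] is copy.insert sec (copy[sec].erase para)
def pvAInner (sec : String) (ps1 ps2 : PySem.Dict String String)
    (st : PySem.Dict String (PySem.Dict String String) × PySem.Dict String (PySem.Dict String String) × PySem.Dict String String × PySem.Dict String String)
    (para : String) :
    PySem.Dict String (PySem.Dict String String) × PySem.Dict String (PySem.Dict String String) × PySem.Dict String String × PySem.Dict String String :=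
  match st with
  | (c1, c2, f1, f2) =>
    -- 2. store all the parameters exist only in para_1
    if ps2.contains para = false then
      (c1.insert sec ((c1.getD sec PySem.Dict.empty).erase para), c2,
       f1.insert para (ps1.getD para ""), f2.insert para "EMPTY")
    else
      -- 3. store the different parameter
      let fs : PySem.Dict String String × PySem.Dict String String :=
        if ps1.getD para "" ≠ ps2.getD para "" then
          (f1.insert para (ps1.getD para ""), f2.insert para (ps2.getD para ""))
        else (f1, f2)
      -- 4. remove the compared parameter
      (c1.insert sec ((c1.getD sec PySem.Dict.empty).erase para),
       c2.insert sec ((c2.getD sec PySem.Dict.empty).erase para), fs.1, fs.2)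

-- loop body of A's 'for sec in para_1'
def pvAStep1 (d1 d2 : PySem.Dict String (PySem.Dict String String))
    (st : PySem.Dict String (PySem.Dict String String) × PySem.Dict String (PySem.Dict String String) × PySem.Dict String String × PySem.Dict String String)
    (sec : String) :
    PySem.Dict String (PySem.Dict String String) × PySem.Dict String (PySem.Dict String String) × PySem.Dict String String × PySem.Dict String String :=
  match st with
  | (c1, c2, f1, f2) =>
    let ps1 := d1.getD sec PySem.Dict.empty
    if d2.contains sec = false then
      -- 1. store all the sections exist only in para_1
      let fs := ps1.keys.foldl (fun (fs : PySem.Dict String String × PySem.Dict String String) para =>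
        (fs.1.insert para (ps1.getD para ""), fs.2.insert para "EMPTY")) (f1, f2)
      (c1, c2, fs.1, fs.2)
    else
      let ps2 := d2.getD sec PySem.Dict.empty
      let st' := ps1.keys.foldl (pvAInner sec ps1 ps2) (c1, c2, f1, f2)
      match st' with
      | (c1, c2, f1, f2) =>
        -- 5. store all the parameters exist only in para_2
        let fs := (c2.getD sec PySem.Dict.empty).keys.foldl
          (fun (fs : PySem.Dict String String × PySem.Dict String String) para =>
            (fs.1.insert para "EMPTY", fs.2.insert para (ps2.getD para ""))) (f1, f2)
        -- 6. clean empty dict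
        (c1.erase sec, c2.erase sec, fs.1, fs.2)

-- loop body of A's final 'for sec in para_2' (step 7)
def pvAStep2 (d1 d2 : PySem.Dict String (PySem.Dict String String))
    (st : PySem.Dict String (PySem.Dict String String) × PySem.Dict String (PySem.Dict String String) × PySem.Dict String String × PySem.Dict String String)
    (sec : String) :
    PySem.Dict String (PySem.Dict String String) × PySem.Dict String (PySem.Dict String String) × PySem.Dict String String × PySem.Dict String String :=
  match st with
  | (c1, c2, f1, f2) =>
    if d1.contains sec then (c1, c2, f1, f2)
    else
      let fs := (c2.getD sec PySem.Dict.empty).keys.foldl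
        (fun (fs : PySem.Dict String String × PySem.Dict String String) para =>
          (fs.1.insert para "EMPTY", fs.2.insert para ((d2.getD sec PySem.Dict.empty).getD para ""))) (f1, f2)
      (c1, c2.erase sec, fs.1, fs.2)

def compare_para (para_1 : List (String × List (String × String))) (para_2 : List (String × List (String × String))) : List (String × List (String × String)) :=
  let d1 := pvDictOf para_1
  let d2 := pvDictOf para_2
  let st1 := d1.keys.foldl (pvAStep1 d1 d2) (d1, d2, PySem.Dict.empty, PySem.Dict.empty)
  let st2 := d2.keys.foldl (pvAStep2 d1 d2) st1
  [("1", st2.2.2.1.items), ("2", st2.2.2.2.items)]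

-- ===== PORT B =====
-- the inner classification loop of Source B: walk the ordered union of parameter names,
-- one (name, v1, v2) triple per reported difference
def pvTriples (ps1 ps2 : PySem.Dict String String) : List (String × String × String) :=
  (ps1.keys ++ ps2.keys.filter (fun k => !(ps1.contains k))).filterMap (fun k =>
    if ps2.contains k = false then some (k, ps1.getD k "", "EMPTY")
    else if ps1.contains k = false then some (k, "EMPTY", ps2.getD k "")
    else if ps1.getD k "" ≠ ps2.getD k "" then some (k, ps1.getD k "", ps2.getD k "")
    else none)

def compare_para_alt (para_1 : List (String × List (String × String))) (para_2 : List (String × List (String × String))) : List (String × List (String × String)) :=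
  let d1 := pvDictOf para_1
  let d2 := pvDictOf para_2
  let secs := d1.keys ++ d2.keys.filter (fun s => !(d1.contains s))
  let triples := secs.flatMap (fun sec =>
    pvTriples (d1.getD sec PySem.Dict.empty) (d2.getD sec PySem.Dict.empty))
  [("1", (PySem.Dict.ofList (triples.map (fun t => (t.1, t.2.1)))).items),
   ("2", (PySem.Dict.ofList (triples.map (fun t => (t.1, t.2.2)))).items)]

-- ===== PRECONDITION & SPEC =====
def Spec_compare_para (para_1 : List (String × List (String × String))) (para_2 : List (String × List (String × String))) (out : List (String × List (String × String))) : Prop := out = compare_para_alt para_1 para_2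
instance (para_1 : List (String × List (String × String))) (para_2 : List (String × List (String × String))) (out : List (String × List (String × String))) : Decidable (Spec_compare_para para_1 para_2 out) := by unfold Spec_compare_para; infer_instance

-- ===== CLAIM (what is proved, stated in full; the proofs are below) =====
def Claim_equal_compare_para : Prop := ∀ (para_1 : List (String × List (String × String))) (para_2 : List (String × List (String × String))), Dom_compare_para para_1 para_2 → Spec_compare_para para_1 para_2 (compare_para para_1 para_2)

-- ===== LEMMAS AND PROOFS =====

-- one step of building the two diff dicts from a (name, v1, v2) triple
def pvStepF (fs : PySem.Dict String String × PySem.Dict String String)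
    (t : String × String × String) :
    PySem.Dict String String × PySem.Dict String String :=
  (fs.1.insert t.1 t.2.1, fs.2.insert t.1 t.2.2)

-- B's per-section contribution to the two diff dicts
def pvTFold (d1 d2 : PySem.Dict String (PySem.Dict String String))
    (fs : PySem.Dict String String × PySem.Dict String String) (sec : String) :
    PySem.Dict String String × PySem.Dict String String :=
  (pvTriples (d1.getD sec PySem.Dict.empty) (d2.getD sec PySem.Dict.empty)).foldl pvStepF fs

-- the canonical form both ports reduce to
def pvRun (d1 d2 : PySem.Dict String (PySem.Dict String String)) :
    PySem.Dict String String × PySem.Dict String String :=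
  (d1.keys ++ d2.keys.filter (fun s => !(d1.contains s))).foldl (pvTFold d1 d2)
    (PySem.Dict.empty, PySem.Dict.empty)

-- the pure effect of A's inner loop (steps 2–3) on the two diff dicts
def pvFInner (ps1 ps2 : PySem.Dict String String)
    (fs : PySem.Dict String String × PySem.Dict String String) (para : String) :
    PySem.Dict String String × PySem.Dict String String :=
  if ps2.contains para = false then pvStepF fs (para, ps1.getD para "", "EMPTY")
  else if ps1.getD para "" ≠ ps2.getD para "" then
    pvStepF fs (para, ps1.getD para "", ps2.getD para "")
  else fs

-- the effect of A's step 5 / step 7 emission on the two diff dicts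
def pvEStep (ps2 : PySem.Dict String String)
    (fs : PySem.Dict String String × PySem.Dict String String) (para : String) :
    PySem.Dict String String × PySem.Dict String String :=
  (fs.1.insert para "EMPTY", fs.2.insert para (ps2.getD para ""))

-- a projection of a fold's state folds the projected step
theorem pv_foldl_proj {α σ τ : Type} (π : σ → τ) (g : σ → α → σ) (h : τ → α → τ)
    (hc : ∀ s a, π (g s a) = h (π s) a) :
    ∀ (l : List α) (s : σ), π (l.foldl g s) = l.foldl h (π s) := by
  intro l
  induction l with
  | nil => intro s; rfl
  | cons a l ih => intro s; simp only [List.foldl_cons, ih, hc]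

theorem pv_foldl_filterMap {α β γ : Type} (f : α → Option β) (g : γ → β → γ)
    (l : List α) (init : γ) :
    (l.filterMap f).foldl g init
      = l.foldl (fun s a => Option.elim (f a) s (g s)) init := by
  induction l generalizing init with
  | nil => rfl
  | cons a l ih =>
    cases h : f a with
    | none => simp only [List.filterMap_cons, h, List.foldl_cons, Option.elim]; exact ih init
    | some b => simp only [List.filterMap_cons, h, List.foldl_cons, Option.elim]; exact ih (g init b)

theorem pv_map_fst_filter {α β : Type} (p : α → Bool) (l : List (α × β)) :
    ((l.filter (fun q => p q.1)).map Prod.fst) = (l.map Prod.fst).filter p := by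
  induction l with
  | nil => rfl
  | cons a l ih =>
    by_cases h : p a.1
    · simp [h, ih]
    · simp [h, ih]

theorem pv_get?_erase_of_ne {ν : Type} (d : PySem.Dict String ν) (k k' : String)
    (h : k' ≠ k) : (d.erase k).get? k' = d.get? k' := by
  obtain ⟨l⟩ := d
  simp only [PySem.Dict.get?, PySem.Dict.erase]
  induction l with
  | nil => rfl
  | cons p l ih =>
    by_cases hp : p.1 = k
    · rw [List.filter_cons_of_neg (by simp [hp]),
        List.find?_cons_of_neg (by simp [hp]; exact Ne.symm h)]
      exact ih
    · rw [List.filter_cons_of_pos (by simp [hp])]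
      by_cases hk' : p.1 = k'
      · rw [List.find?_cons_of_pos (by simp [hk']), List.find?_cons_of_pos (by simp [hk'])]
      · rw [List.find?_cons_of_neg (by simp [hk']), List.find?_cons_of_neg (by simp [hk'])]
        exact ih

-- folding conditional erases over a key list filters the items
theorem pv_erase_fold {ν : Type} (p : String → Bool) (ks : List String)
    (d : PySem.Dict String ν) :
    ks.foldl (fun d k => if p k = false then d else d.erase k) d
      = PySem.Dict.mk (d.items.filter (fun q => !(p q.1 && decide (q.1 ∈ ks)))) := by
  induction ks generalizing d with
  | nil =>
    obtain ⟨l⟩ := d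
    simp
  | cons k ks ih =>
    simp only [List.foldl_cons]
    by_cases hpk : p k = true
    · rw [if_neg (by simp [hpk]), ih]
      simp only [PySem.Dict.erase, List.filter_filter]
      congr 1
      apply List.filter_congr
      intro q _
      by_cases hq : q.1 = k
      · simp [hq, hpk]
      · simp [hq]
    · have hpk' : p k = false := by simpa using hpk
      rw [if_pos hpk', ih]
      congr 1
      apply List.filter_congr
      intro q _
      by_cases hq : q.1 = k
      · simp [hq, hpk']
      · simp [hq]

theorem pv_foldl_id {α σ : Type} (l : List α) (x : σ) :
    l.foldl (fun t _ => t) x = x := by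
  induction l with
  | nil => rfl
  | cons a l ih => simpa using ih

theorem pv_contains_of_mem_keys {ν : Type} (d : PySem.Dict String ν) (k : String)
    (h : k ∈ d.keys) : d.contains k = true :=
  (PySem.Dict.contains_iff_mem_keys d k).2 h

-- B's per-section triples, folded: first the para_1 names, then the para_2-only names
theorem pv_triples_fold (ps1 ps2 : PySem.Dict String String)
    (fs : PySem.Dict String String × PySem.Dict String String) :
    (pvTriples ps1 ps2).foldl pvStepF fs
      = (ps2.keys.filter (fun k => !(ps1.contains k))).foldl (pvEStep ps2)
          (ps1.keys.foldl (pvFInner ps1 ps2) fs) := by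
  unfold pvTriples
  rw [List.filterMap_append, List.foldl_append]
  simp only [pv_foldl_filterMap]
  rw [PySem.List.foldl_congr_mem ps1.keys
      (fun (s : PySem.Dict String String × PySem.Dict String String) (k : String) =>
        Option.elim (if ps2.contains k = false then some (k, ps1.getD k "", "EMPTY")
               else if ps1.contains k = false then some (k, "EMPTY", ps2.getD k "")
               else if ps1.getD k "" ≠ ps2.getD k "" then some (k, ps1.getD k "", ps2.getD k "")
               else none) s (pvStepF s))
      (pvFInner ps1 ps2) fs
      (by
        intro acc x hx
        have hx1 := pv_contains_of_mem_keys ps1 x hx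
        cases hq : ps2.contains x with
        | false => simp [pvFInner, hq]
        | true =>
          by_cases hv : ps1.getD x "" = ps2.getD x ""
          · simp [pvFInner, hq, hx1, hv]
          · simp [pvFInner, hq, hx1, hv])]
  rw [PySem.List.foldl_congr_mem (ps2.keys.filter (fun k => !(ps1.contains k)))
      (fun (s : PySem.Dict String String × PySem.Dict String String) (k : String) =>
        Option.elim (if ps2.contains k = false then some (k, ps1.getD k "", "EMPTY")
               else if ps1.contains k = false then some (k, "EMPTY", ps2.getD k "")
               else if ps1.getD k "" ≠ ps2.getD k "" then some (k, ps1.getD k "", ps2.getD k "")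
               else none) s (pvStepF s))
      (pvEStep ps2) (ps1.keys.foldl (pvFInner ps1 ps2) fs)
      (by
        intro acc x hx
        obtain ⟨hx2, hxf⟩ := List.mem_filter.1 hx
        have hx2c := pv_contains_of_mem_keys ps2 x hx2
        have hx1 : ps1.contains x = false := by simpa using hxf
        simp [pvEStep, pvStepF, hx2c, hx1])]

-- projections of A's inner loop
theorem pv_inner_proj (sec : String) (ps1 ps2 : PySem.Dict String String)
    (ks : List String)
    (st : PySem.Dict String (PySem.Dict String String) × PySem.Dict String (PySem.Dict String String) × PySem.Dict String String × PySem.Dict String String) :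
    (ks.foldl (pvAInner sec ps1 ps2) st).2.2 = ks.foldl (pvFInner ps1 ps2) st.2.2 := by
  refine pv_foldl_proj (fun st => st.2.2) _ _ ?_ ks st
  intro s a
  obtain ⟨x1, x2, xf1, xf2⟩ := s
  cases hq : ps2.contains a with
  | false => simp [pvAInner, pvFInner, pvStepF, hq]
  | true =>
    by_cases hv : ps1.getD a "" = ps2.getD a ""
    · simp [pvAInner, pvFInner, pvStepF, hq, hv]
    · simp [pvAInner, pvFInner, pvStepF, hq, hv]

theorem pv_inner_c2 (sec : String) (ps1 ps2 : PySem.Dict String String)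
    (ks : List String)
    (st : PySem.Dict String (PySem.Dict String String) × PySem.Dict String (PySem.Dict String String) × PySem.Dict String String × PySem.Dict String String) :
    (ks.foldl (pvAInner sec ps1 ps2) st).2.1
      = ks.foldl (fun (c : PySem.Dict String (PySem.Dict String String)) k =>
          if ps2.contains k = false then c
          else c.insert sec ((c.getD sec PySem.Dict.empty).erase k)) st.2.1 := by
  refine pv_foldl_proj (fun st => st.2.1) _ _ ?_ ks st
  intro s a
  obtain ⟨x1, x2, xf1, xf2⟩ := s
  cases hq : ps2.contains a with
  | false => simp [pvAInner, hq]
  | true =>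
    by_cases hv : ps1.getD a "" = ps2.getD a ""
    · simp [pvAInner, hq, hv]
    · simp [pvAInner, hq, hv]

theorem pv_inner_c2_getD (sec : String) (ps2 : PySem.Dict String String)
    (ks : List String) (c : PySem.Dict String (PySem.Dict String String)) :
    ((ks.foldl (fun (c : PySem.Dict String (PySem.Dict String String)) k =>
        if ps2.contains k = false then c
        else c.insert sec ((c.getD sec PySem.Dict.empty).erase k)) c).getD sec PySem.Dict.empty)
      = ks.foldl (fun (d : PySem.Dict String String) k =>
          if ps2.contains k = false then d else d.erase k) (c.getD sec PySem.Dict.empty) := by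
  refine pv_foldl_proj (fun c => c.getD sec PySem.Dict.empty) _ _ ?_ ks c
  intro s a
  cases hq : ps2.contains a with
  | false => simp
  | true => simp [PySem.Dict.getD_insert_self]

theorem pv_inner_c2_get? (sec : String) (ps2 : PySem.Dict String String)
    (s : String) (hs : s ≠ sec) (ks : List String)
    (c : PySem.Dict String (PySem.Dict String String)) :
    ((ks.foldl (fun (c : PySem.Dict String (PySem.Dict String String)) k =>
        if ps2.contains k = false then c
        else c.insert sec ((c.getD sec PySem.Dict.empty).erase k)) c).get? s) = c.get? s := by
  rw [pv_foldl_proj (fun c => c.get? s) _ (fun t _ => t) ?_ ks c, pv_foldl_id]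
  intro c a
  cases hq : ps2.contains a with
  | false => simp
  | true => simp [PySem.Dict.get?_insert_of_ne, hs]

-- the keys of para_2_copy[sec] after the inner loop
theorem pv_keys_after (ps1 ps2 : PySem.Dict String String) :
    (ps1.keys.foldl (fun (d : PySem.Dict String String) k =>
        if ps2.contains k = false then d else d.erase k) ps2).keys
      = ps2.keys.filter (fun k => !(ps1.contains k)) := by
  rw [pv_erase_fold]
  show (List.filter _ ps2.items).map Prod.fst = _
  rw [List.filter_congr (q := fun q => !(ps1.contains q.1))
    (by
      intro q hq
      have hq2 : ps2.contains q.1 = true :=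
        pv_contains_of_mem_keys ps2 q.1 (PySem.Dict.mem_keys_of_mem_items ps2 hq)
      rw [← PySem.Dict.contains_eq_decide_mem_keys ps1 q.1, hq2]
      simp)]
  exact pv_map_fst_filter (fun k => !(ps1.contains k)) ps2.items

-- per-section lemma: section only in para_1
theorem pv_step1_only1 (d1 d2 : PySem.Dict String (PySem.Dict String String))
    (ps1 : PySem.Dict String String)
    (c1 c2 : PySem.Dict String (PySem.Dict String String))
    (f1 f2 : PySem.Dict String String) (sec : String)
    (hps1 : d1.getD sec PySem.Dict.empty = ps1)
    (h : d2.contains sec = false) :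
    pvAStep1 d1 d2 (c1, c2, f1, f2) sec = (c1, c2, pvTFold d1 d2 (f1, f2) sec) := by
  have hps2 : d2.getD sec PySem.Dict.empty = PySem.Dict.empty :=
    PySem.Dict.getD_of_not_contains d2 PySem.Dict.empty h
  have htf : pvTFold d1 d2 (f1, f2) sec
      = ps1.keys.foldl (fun (fs : PySem.Dict String String × PySem.Dict String String) para =>
          (fs.1.insert para (ps1.getD para ""), fs.2.insert para "EMPTY")) (f1, f2) := by
    unfold pvTFold
    rw [hps1, hps2, pv_triples_fold]
    simp only [PySem.Dict.keys_empty, List.filter_nil, List.foldl_nil]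
    apply PySem.List.foldl_congr_mem
    intro acc x _
    simp [pvFInner, pvStepF, PySem.Dict.contains_empty]
  rw [htf]
  simp [pvAStep1, h, hps1]

-- per-section lemma: section in both
theorem pv_step1_common (d1 d2 : PySem.Dict String (PySem.Dict String String))
    (ps1 ps2 : PySem.Dict String String)
    (c1 c2 : PySem.Dict String (PySem.Dict String String))
    (f1 f2 : PySem.Dict String String) (sec : String)
    (hps1 : d1.getD sec PySem.Dict.empty = ps1)
    (hps2 : d2.getD sec PySem.Dict.empty = ps2)
    (h : d2.contains sec = true) (hc2 : c2.get? sec = d2.get? sec) :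
    ∃ c1' c2', pvAStep1 d1 d2 (c1, c2, f1, f2) sec = (c1', c2', pvTFold d1 d2 (f1, f2) sec)
      ∧ ∀ s, s ≠ sec → c2'.get? s = c2.get? s := by
  have hc2' : c2.getD sec PySem.Dict.empty = ps2 := by
    rw [PySem.Dict.getD_eq_get?_getD, hc2, ← PySem.Dict.getD_eq_get?_getD, hps2]
  have hstep : pvAStep1 d1 d2 (c1, c2, f1, f2) sec
      = ((ps1.keys.foldl (pvAInner sec ps1 ps2) (c1, c2, f1, f2)).1.erase sec,
         ((ps1.keys.foldl (pvAInner sec ps1 ps2) (c1, c2, f1, f2)).2.1).erase sec,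
         (((ps1.keys.foldl (pvAInner sec ps1 ps2) (c1, c2, f1, f2)).2.1).getD sec PySem.Dict.empty).keys.foldl
           (pvEStep ps2)
           ((ps1.keys.foldl (pvAInner sec ps1 ps2) (c1, c2, f1, f2)).2.2)) := by
    simp [pvAStep1, h, hps1, hps2]
    rfl
  have htf : pvTFold d1 d2 (f1, f2) sec
      = (ps2.keys.filter (fun k => !(ps1.contains k))).foldl (pvEStep ps2)
          (ps1.keys.foldl (pvFInner ps1 ps2) (f1, f2)) := by
    unfold pvTFold
    rw [hps1, hps2, pv_triples_fold]
  refine ⟨(ps1.keys.foldl (pvAInner sec ps1 ps2) (c1, c2, f1, f2)).1.erase sec,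
          ((ps1.keys.foldl (pvAInner sec ps1 ps2) (c1, c2, f1, f2)).2.1).erase sec, ?_, ?_⟩
  · rw [hstep, htf, pv_inner_c2, pv_inner_c2_getD, hc2', pv_keys_after, pv_inner_proj]
  · intro s hs
    rw [pv_get?_erase_of_ne _ _ _ hs, pv_inner_c2, pv_inner_c2_get? sec ps2 s hs]

theorem pv_step2_skip (d1 d2 : PySem.Dict String (PySem.Dict String String))
    (st : PySem.Dict String (PySem.Dict String String) × PySem.Dict String (PySem.Dict String String) × PySem.Dict String String × PySem.Dict String String)
    (sec : String) (h : d1.contains sec = true) :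
    pvAStep2 d1 d2 st sec = st := by
  simp [pvAStep2, h]

theorem pv_step2_only2 (d1 d2 : PySem.Dict String (PySem.Dict String String))
    (ps2 : PySem.Dict String String)
    (c1 c2 : PySem.Dict String (PySem.Dict String String))
    (f1 f2 : PySem.Dict String String) (sec : String)
    (hps2 : d2.getD sec PySem.Dict.empty = ps2)
    (h : d1.contains sec = false) (hc2 : c2.get? sec = d2.get? sec) :
    ∃ c2', pvAStep2 d1 d2 (c1, c2, f1, f2) sec = (c1, c2', pvTFold d1 d2 (f1, f2) sec)
      ∧ ∀ s, s ≠ sec → c2'.get? s = c2.get? s := by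
  have hps1 : d1.getD sec PySem.Dict.empty = PySem.Dict.empty :=
    PySem.Dict.getD_of_not_contains d1 PySem.Dict.empty h
  have hc2' : c2.getD sec PySem.Dict.empty = ps2 := by
    rw [PySem.Dict.getD_eq_get?_getD, hc2, ← PySem.Dict.getD_eq_get?_getD, hps2]
  have htf : pvTFold d1 d2 (f1, f2) sec = ps2.keys.foldl (pvEStep ps2) (f1, f2) := by
    unfold pvTFold
    rw [hps1, hps2, pv_triples_fold]
    simp [PySem.Dict.keys_empty, PySem.Dict.contains_empty]
  refine ⟨c2.erase sec, ?_, ?_⟩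
  · rw [htf]
    simp [pvAStep2, h, hps2, hc2']
    rfl
  · intro s hs
    exact pv_get?_erase_of_ne c2 sec s hs

-- the first outer loop
theorem pv_outer1 (d1 d2 : PySem.Dict String (PySem.Dict String String))
    (rest : List String) :
    rest.Nodup → (∀ s ∈ rest, d1.contains s = true) →
    ∀ (c1 c2 : PySem.Dict String (PySem.Dict String String)) (f1 f2 : PySem.Dict String String),
    (∀ s, (s ∈ rest ∨ d1.contains s = false) → c2.get? s = d2.get? s) →
    (rest.foldl (pvAStep1 d1 d2) (c1, c2, f1, f2)).2.2
        = rest.foldl (pvTFold d1 d2) (f1, f2)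
      ∧ ∀ s, d1.contains s = false →
        (rest.foldl (pvAStep1 d1 d2) (c1, c2, f1, f2)).2.1.get? s = d2.get? s := by
  induction rest with
  | nil =>
    intro _ _ c1 c2 f1 f2 hinv
    exact ⟨rfl, fun s hs => hinv s (Or.inr hs)⟩
  | cons sec rest ih =>
    intro hnd hsub c1 c2 f1 f2 hinv
    simp only [List.foldl_cons]
    by_cases hsec : d2.contains sec = true
    · obtain ⟨c1', c2', heq, hpres⟩ := pv_step1_common d1 d2
        (d1.getD sec PySem.Dict.empty) (d2.getD sec PySem.Dict.empty)
        c1 c2 f1 f2 sec rfl rfl hsec (hinv sec (Or.inl List.mem_cons_self))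
      rw [heq]
      refine ih (List.nodup_cons.1 hnd).2 (fun s hs => hsub s (List.mem_cons_of_mem _ hs))
        c1' c2' _ _ ?_
      intro s hs
      have hne : s ≠ sec := by
        rcases hs with h1 | h1
        · rintro rfl; exact (List.nodup_cons.1 hnd).1 h1
        · intro he; rw [he, hsub sec List.mem_cons_self] at h1; simp at h1
      rw [hpres s hne]
      refine hinv s ?_
      rcases hs with h1 | h1
      · exact Or.inl (List.mem_cons_of_mem _ h1)
      · exact Or.inr h1
    · have hsec' : d2.contains sec = false := by simpa using hsec
      rw [pv_step1_only1 d1 d2 (d1.getD sec PySem.Dict.empty) c1 c2 f1 f2 sec rfl hsec']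
      refine ih (List.nodup_cons.1 hnd).2 (fun s hs => hsub s (List.mem_cons_of_mem _ hs))
        c1 c2 _ _ ?_
      intro s hs
      refine hinv s ?_
      rcases hs with h1 | h1
      · exact Or.inl (List.mem_cons_of_mem _ h1)
      · exact Or.inr h1

-- the second outer loop (step 7)
theorem pv_outer2 (d1 d2 : PySem.Dict String (PySem.Dict String String))
    (rest : List String) :
    rest.Nodup →
    ∀ (st : PySem.Dict String (PySem.Dict String String) × PySem.Dict String (PySem.Dict String String) × PySem.Dict String String × PySem.Dict String String),
    (∀ s, s ∈ rest → d1.contains s = false → st.2.1.get? s = d2.get? s) →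
    (rest.foldl (pvAStep2 d1 d2) st).2.2
      = (rest.filter (fun s => !(d1.contains s))).foldl (pvTFold d1 d2) st.2.2 := by
  induction rest with
  | nil => intro _ st _; rfl
  | cons sec rest ih =>
    intro hnd st hinv
    by_cases h1 : d1.contains sec = true
    · rw [List.foldl_cons, pv_step2_skip d1 d2 st sec h1,
        List.filter_cons_of_neg (by simp [h1])]
      exact ih (List.nodup_cons.1 hnd).2 st
        (fun s hs hc => hinv s (List.mem_cons_of_mem _ hs) hc)
    · have h1' : d1.contains sec = false := by simpa using h1
      obtain ⟨a, b, g1, g2⟩ := st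
      obtain ⟨c2', heq, hpres⟩ := pv_step2_only2 d1 d2 (d2.getD sec PySem.Dict.empty)
        a b g1 g2 sec rfl h1' (hinv sec List.mem_cons_self h1')
      rw [List.foldl_cons, heq, List.filter_cons_of_pos (by simp [h1']), List.foldl_cons]
      refine ih (List.nodup_cons.1 hnd).2 (a, c2', pvTFold d1 d2 (g1, g2) sec) ?_
      intro s hs hc
      show c2'.get? s = d2.get? s
      rw [hpres s (by rintro rfl; exact (List.nodup_cons.1 hnd).1 hs)]
      exact hinv s (List.mem_cons_of_mem _ hs) hc

theorem pv_run_flat (d1 d2 : PySem.Dict String (PySem.Dict String String)) :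
    pvRun d1 d2
      = ((d1.keys ++ d2.keys.filter (fun s => !(d1.contains s))).flatMap
          (fun sec => pvTriples (d1.getD sec PySem.Dict.empty) (d2.getD sec PySem.Dict.empty))).foldl
          pvStepF (PySem.Dict.empty, PySem.Dict.empty) := by
  unfold pvRun
  rw [List.foldl_flatMap]
  rfl

theorem pv_stepF_prod (l : List (String × String × String))
    (a b : PySem.Dict String String) :
    l.foldl pvStepF (a, b)
      = (l.foldl (fun (d : PySem.Dict String String) t => d.insert t.1 t.2.1) a,
         l.foldl (fun (d : PySem.Dict String String) t => d.insert t.1 t.2.2) b) :=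
  PySem.List.foldl_prod_mk
    (fun (d : PySem.Dict String String) (t : String × String × String) => d.insert t.1 t.2.1)
    (fun (d : PySem.Dict String String) (t : String × String × String) => d.insert t.1 t.2.2) l a b

theorem pv_B_eq (p1 p2 : List (String × List (String × String))) :
    compare_para_alt p1 p2
      = [("1", (pvRun (pvDictOf p1) (pvDictOf p2)).1.items),
         ("2", (pvRun (pvDictOf p1) (pvDictOf p2)).2.items)] := by
  rw [pv_run_flat, pv_stepF_prod]
  simp only [compare_para_alt, PySem.Dict.ofList, PySem.Dict.update, List.foldl_map]

theorem pv_A_eq (p1 p2 : List (String × List (String × String))) :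
    compare_para p1 p2
      = [("1", (pvRun (pvDictOf p1) (pvDictOf p2)).1.items),
         ("2", (pvRun (pvDictOf p1) (pvDictOf p2)).2.items)] := by
  have h1 : (pvDictOf p1).keys.Nodup := PySem.Dict.nodup_keys_ofList _
  have h2 : (pvDictOf p2).keys.Nodup := PySem.Dict.nodup_keys_ofList _
  obtain ⟨hf1, hc⟩ := pv_outer1 (pvDictOf p1) (pvDictOf p2) (pvDictOf p1).keys h1
    (fun s hs => pv_contains_of_mem_keys _ s hs)
    (pvDictOf p1) (pvDictOf p2) PySem.Dict.empty PySem.Dict.empty (fun s _ => rfl)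
  have hout2 := pv_outer2 (pvDictOf p1) (pvDictOf p2) (pvDictOf p2).keys h2
    ((pvDictOf p1).keys.foldl (pvAStep1 (pvDictOf p1) (pvDictOf p2))
      (pvDictOf p1, pvDictOf p2, PySem.Dict.empty, PySem.Dict.empty))
    (fun s _ hcf => hc s hcf)
  unfold pvRun
  rw [List.foldl_append, ← hf1, ← hout2]
  rfl

-- ===== VERDICT (by name: the statement is the Claim_ definition above) =====
theorem compare_para_spec : Claim_equal_compare_para := by
  intro p1 p2 _
  show compare_para p1 p2 = compare_para_alt p1 p2
  rw [pv_A_eq, pv_B_eq]
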